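-- pv_equiv track=rewrite | github.com/Frazzer951/Advent-Of-Code | 2015/1/code.py | part2
-- ===== SOURCE A (Python) =====
-- def part2(input):
--     floor = 0
--
--     for i in range(len(input[0])):
--         if input[0][i] == "(":
--             floor += 1
--         if input[0][i] == ")":
--             floor -= 1
--         if floor == -1:
--             return i + 1
--     return -1
-- ===== SOURCE B (Python) =====
-- def part2(input):
--     # Jump between ')' occurrences with str.find and count the '(' in each
--     # gap with str.count, instead of walking the string character by character.
--     s = input[0]
--     floor = 0
--     pos = 0
--     while True:
--         j = s.find(')', pos)
--         if j == -1:
--             return -1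
--         floor += s[pos:j].count('(') - 1
--         if floor == -1:
--             return j + 1
--         pos = j + 1
-- ===== Notes on version B (the rewrite author's own statement) =====
-- stated objective: alternative
-- what changed: Instead of walking the string one character at a time with a running floor, B jumps from one ')' to the next with str.find and adds str.count of '(' over each gap to the balance, testing for -1 only at ')' positions.
-- outside the precondition, e.g. on part2([]): A raises IndexError, B raises IndexError
import Mathlib
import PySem

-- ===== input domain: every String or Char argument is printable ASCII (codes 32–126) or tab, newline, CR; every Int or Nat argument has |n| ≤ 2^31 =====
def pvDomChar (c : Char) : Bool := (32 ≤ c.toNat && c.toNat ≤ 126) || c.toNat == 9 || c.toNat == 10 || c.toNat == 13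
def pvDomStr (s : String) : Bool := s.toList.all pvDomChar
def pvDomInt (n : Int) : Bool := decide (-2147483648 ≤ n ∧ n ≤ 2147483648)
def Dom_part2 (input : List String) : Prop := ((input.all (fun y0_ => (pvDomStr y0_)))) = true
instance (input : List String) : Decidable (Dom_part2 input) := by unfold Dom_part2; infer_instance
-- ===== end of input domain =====

-- B replaces A's per-character scan by jumping between ')' occurrences with
-- str.find and counting the '(' in each gap with str.count (objective: alternative).

-- ===== PORT A =====
-- A's loop 'for i in range(len(input[0]))' with early return, as index recursion.
def part2Loop (cs : List Char) (floor : Int) (i : Nat) : Int :=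
  if h : i < cs.length then
    let c := PySem.List.pyGetD cs (i : Int) ' '
    let f1 := if c = '(' then floor + 1 else floor
    let f2 := if c = ')' then f1 - 1 else f1
    if f2 = -1 then (i : Int) + 1 else part2Loop cs f2 (i + 1)
  else -1
termination_by cs.length - i
decreasing_by omega

def part2 (input : List String) : Int :=
  part2Loop (PySem.List.pyGetD input 0 "").toList 0 0

-- ===== PORT B =====
-- B's while loop: find the next ')', add (count of '(' in the gap) - 1, test, advance.
def part2AltLoop (cs : List Char) (floor : Int) (pos : Nat) (hpos : pos ≤ cs.length) : Int :=
  let j := PySem.Chars.findFrom cs [')'] (pos : Int)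
  if hj : j = -1 then -1
  else
    have hsp := PySem.Chars.findFrom_natCast_spec cs [')'] pos hpos hj
    have hlt : j.toNat < cs.length := by
      have := hsp.2.1.length_le
      simp [List.length_drop] at this
      omega
    let floor' := floor + ((PySem.Chars.count (PySem.List.slice cs (some (pos : Int)) (some j)) ['(']) : Int) - 1
    if floor' = -1 then j + 1
    else part2AltLoop cs floor' (j.toNat + 1) (by omega)
termination_by cs.length - pos
decreasing_by
  have := hsp.1
  omega

def part2_alt (input : List String) : Int :=
  part2AltLoop (PySem.List.pyGetD input 0 "").toList 0 0 (Nat.zero_le _)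

-- ===== PRECONDITION & SPEC =====
-- Pre_ excludes only the empty list, on which A's 'input[0]' raises IndexError.
def Pre_part2 (input : List String) : Prop := input ≠ []
instance (input : List String) : Decidable (Pre_part2 input) := by unfold Pre_part2; infer_instance
def pvWitness_part2 : List String := ["(()"]

def Spec_part2 (input : List String) (out : Int) : Prop := out = part2_alt input
instance (input : List String) (out : Int) : Decidable (Spec_part2 input out) := by unfold Spec_part2; infer_instance

-- ===== CLAIM (what is proved, stated in full; the proofs are below) =====
def Claim_equal_part2 : Prop := ∀ (input : List String), Dom_part2 input → Pre_part2 input → Spec_part2 input (part2 input)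

-- ===== LEMMAS AND PROOFS =====

-- str.count with a single-character needle is List.count.
lemma countGo_single (c : Char) : ∀ (fuel : Nat) (l : List Char) (acc : Nat),
    l.length ≤ fuel → PySem.Chars.count.go [c] fuel l acc = acc + l.count c := by
  intro fuel
  induction fuel with
  | zero =>
    intro l acc h
    cases l with
    | nil => simp [PySem.Chars.count.go]
    | cons x t => simp at h
  | succ n ih =>
    intro l acc h
    cases l with
    | nil => simp [PySem.Chars.count.go]
    | cons x t =>
      by_cases hx : x = c
      · subst hx
        simp [PySem.Chars.count.go, List.isPrefixOf, ih t (acc + 1) (by simpa using h)]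
        omega
      · have hx' : ¬ c = x := fun h' => hx h'.symm
        simp [PySem.Chars.count.go, List.isPrefixOf, hx', ih t acc (by simpa using h),
          List.count_cons]
        exact hx

lemma count_single (l : List Char) (c : Char) : PySem.Chars.count l [c] = l.count c := by
  simp [PySem.Chars.count, countGo_single c l.length l 0 le_rfl]

-- A's scan over a gap containing no ')' just accumulates the count of '('.
lemma part2Loop_gap (k : Nat) : ∀ (cs : List Char) (f : Int) (pos m : Nat),
    m - pos = k → pos ≤ m → m ≤ cs.length → 0 ≤ f →
    (∀ i, pos ≤ i → i < m → cs.getD i ' ' ≠ ')') →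
    part2Loop cs f pos
      = part2Loop cs (f + (((cs.drop pos).take (m - pos)).count '(' : Int)) m := by
  induction k with
  | zero =>
      intro cs f pos m hk h1 h2 h3 h4
      have hm : m = pos := by omega
      subst hm
      simp
  | succ n ih =>
      intro cs f pos m hk h1 h2 h3 h4
      have hpm : pos < m := by omega
      have hlen : pos < cs.length := by omega
      have hget : cs.getD pos ' ' = cs[pos] := List.getD_eq_getElem cs ' ' hlen
      have hnc : ¬ cs.getD pos ' ' = ')' := h4 pos le_rfl hpm
      rw [part2Loop, dif_pos hlen]
      simp only [PySem.List.pyGetD_natCast]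
      rw [if_neg hnc]
      have hf2 : ¬ (if cs.getD pos ' ' = '(' then f + 1 else f) = -1 := by
        split_ifs <;> omega
      rw [if_neg hf2]
      rw [ih cs _ (pos + 1) m (by omega) (by omega) (by omega)
        (by split_ifs <;> omega)
        (fun i hi hi' => h4 i (by omega) hi')]
      congr 1
      rw [List.drop_eq_getElem_cons hlen,
        show m - pos = (m - (pos + 1)) + 1 by omega, List.take_succ_cons, List.count_cons]
      rw [hget]
      by_cases hx : cs[pos] = '('
      · simp [hx]; ring
      · simp [hx]
  
lemma part2Loop_stop (cs : List Char) (f : Int) :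
    part2Loop cs f cs.length = -1 := by
  rw [part2Loop]
  simp

-- No ')' from pos on: A falls off the end and returns -1.
lemma part2Loop_tail (cs : List Char) (f : Int) (pos : Nat) (h3 : 0 ≤ f)
    (h2 : pos ≤ cs.length)
    (h4 : ∀ i, pos ≤ i → i < cs.length → cs.getD i ' ' ≠ ')') :
    part2Loop cs f pos = -1 := by
  rw [part2Loop_gap (cs.length - pos) cs f pos cs.length rfl h2 le_rfl h3 h4]
  exact part2Loop_stop cs _

lemma mem_drop_of_le {cs : List Char} {i pos : Nat} (h : i < cs.length) (h2 : pos ≤ i) :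
    cs[i] ∈ cs.drop pos := by
  have hx : cs[i] = (cs.drop pos)[i - pos]'(by simp; omega) := by
    rw [List.getElem_drop]; congr 1; omega
  rw [hx]; exact List.getElem_mem _

-- The key induction: A's scan equals B's jump loop from any state with floor ≥ 0.
lemma part2Loop_eq_altLoop (k : Nat) : ∀ (cs : List Char) (f : Int) (pos : Nat)
    (hpos : pos ≤ cs.length), cs.length - pos = k → 0 ≤ f →
    part2Loop cs f pos = part2AltLoop cs f pos hpos := by
  induction k using Nat.strong_induction_on with
  | _ k ih =>
    intro cs f pos hpos hk hf
    rw [part2AltLoop]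
    by_cases hj : PySem.Chars.findFrom cs [')'] (pos : Int) = -1
    · rw [dif_pos hj]
      have hm := (PySem.Chars.findFrom_natCast_eq_neg_one_iff cs [')'] pos hpos).mp hj
      refine part2Loop_tail cs f pos hf hpos ?_
      intro i h1 h2 hc
      apply hm
      rw [List.singleton_infix_iff]
      have hgi : cs.getD i ' ' = cs[i] := List.getD_eq_getElem cs ' ' h2
      rw [← hc, hgi]
      exact mem_drop_of_le h2 h1
    · rw [dif_neg hj]
      obtain ⟨hpj, hpre, hmin⟩ := PySem.Chars.findFrom_natCast_spec cs [')'] pos hpos hj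
      have hj0 : (0 : Int) ≤ PySem.Chars.findFrom cs [')'] (pos : Int) :=
        le_trans (by positivity) hpj
      set j := PySem.Chars.findFrom cs [')'] (pos : Int) with hjdef
      set m := j.toNat with hmdef
      have hjm : j = (m : Int) := (Int.toNat_of_nonneg hj0).symm
      have hmlen : m < cs.length := by
        have := hpre.length_le
        simp [List.length_drop] at this
        omega
      have hpm : pos ≤ m := by omega
      have hcm : cs[m] = ')' := by
        rw [List.drop_eq_getElem_cons hmlen] at hpre
        exact (List.cons_prefix_cons.mp hpre).1.symm
      have h4 : ∀ i, pos ≤ i → i < m → cs.getD i ' ' ≠ ')' := by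
        intro i h1 h2 hc
        apply hmin i h1 h2
        have hilen : i < cs.length := by omega
        rw [List.drop_eq_getElem_cons hilen]
        have hgi : cs.getD i ' ' = cs[i] := List.getD_eq_getElem cs ' ' hilen
        rw [List.cons_prefix_cons]
        exact ⟨by rw [← hgi, hc], List.nil_prefix⟩
      rw [part2Loop_gap (m - pos) cs f pos m rfl hpm (le_of_lt hmlen) hf h4]
      rw [part2Loop, dif_pos hmlen]
      simp only [PySem.List.pyGetD_natCast]
      have hgm : cs.getD m ' ' = ')' := by
        rw [List.getD_eq_getElem cs ' ' hmlen]; exact hcm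
      rw [hgm, if_neg (show ¬ (')' : Char) = '(' from by decide),
        if_pos (show (')' : Char) = ')' from rfl)]
      have hslice : PySem.Chars.count (PySem.List.slice cs (some (pos : Int)) (some j)) ['(']
          = ((cs.drop pos).take (m - pos)).count '(' := by
        rw [hjm, PySem.List.slice_natCast, count_single]
      by_cases hend : f + (((cs.drop pos).take (m - pos)).count '(' : Int) - 1 = -1
      · rw [if_pos hend, if_pos (by rw [hslice]; omega)]
        omega
      · rw [if_neg hend, if_neg (by rw [hslice]; omega)]
        rw [show f + (((cs.drop pos).take (m - pos)).count '(' : Int) - 1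
            = f + (PySem.Chars.count (PySem.List.slice cs (some (pos : Int)) (some j)) ['('] : Int) - 1
          from by rw [hslice]]
        exact ih (cs.length - (m + 1)) (by omega) cs _ (m + 1) (by omega) rfl
          (by rw [hslice]; omega)

theorem part2_spec : Claim_equal_part2 := by
  intro input _hdom _hpre
  unfold Spec_part2 part2 part2_alt
  exact part2Loop_eq_altLoop _ _ 0 0 (Nat.zero_le _) rfl le_rfl
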